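-- pv_equiv track=rewrite | github.com/Iskandar-Muzaffar/CP125-Class-Repo | labs/lab05/exercise3/exercise3.py | find_bottleneck_index
-- ===== SOURCE A (Python) =====
-- def find_bottleneck_index(traceroute):
--
--     """
--     Find the index of the hop where the largest latency jump begins.
--     """
--
--     largest_latency = 0
--     bottleneck_index = 0
--
--     for i in range (1, len(traceroute)):
--         if traceroute[i][1] - traceroute[i-1][1] > largest_latency:
--             largest_latency = traceroute[i][1] - traceroute[i-1][1]
--             bottleneck_index = i-1
--
--     return bottleneck_index
-- ===== SOURCE B (Python) =====
-- def find_bottleneck_index(traceroute):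
--     """
--     Find the index of the hop where the largest latency jump begins.
--     """
--     jumps = [traceroute[i][1] - traceroute[i - 1][1] for i in range(1, len(traceroute))]
--     if not jumps or max(jumps) <= 0:
--         return 0
--     return jumps.index(max(jumps))
-- ===== Notes on version B (the rewrite author's own statement) =====
-- stated objective: alternative
-- what changed: Replaces the single running-max-with-index loop by a build-then-reduce decomposition: first materialise the list of consecutive latency differences, then return 0 if it is empty or its maximum is not positive, else the first index of that maximum.
import Mathlib
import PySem

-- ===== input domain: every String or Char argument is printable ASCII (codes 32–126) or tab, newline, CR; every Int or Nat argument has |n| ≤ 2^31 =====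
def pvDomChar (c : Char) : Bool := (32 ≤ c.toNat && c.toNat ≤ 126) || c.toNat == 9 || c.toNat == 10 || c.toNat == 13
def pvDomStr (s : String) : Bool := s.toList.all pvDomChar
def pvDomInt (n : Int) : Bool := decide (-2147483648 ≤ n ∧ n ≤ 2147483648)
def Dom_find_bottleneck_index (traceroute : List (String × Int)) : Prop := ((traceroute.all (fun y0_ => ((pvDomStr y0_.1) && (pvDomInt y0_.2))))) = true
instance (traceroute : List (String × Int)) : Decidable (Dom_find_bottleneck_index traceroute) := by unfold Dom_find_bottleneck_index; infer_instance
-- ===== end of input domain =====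

-- B replaces A's running-max loop by a build-jumps-list-then-argmax decomposition (alternative, same cost).


-- ===== PORT A =====
-- Literal port of A's loop 'for i in range(1, len(traceroute))' carrying (largest_latency, bottleneck_index).
-- traceroute[i] / traceroute[i-1] are ported with pyGetD: every index the range produces is in bounds, so this is exact.
def find_bottleneck_index (traceroute : List (String × Int)) : Int :=
  ((PySem.List.pyRange 1 (traceroute.length : Int) 1).foldl
    (fun (s : Int × Int) i =>
      if (PySem.List.pyGetD traceroute i ("", 0)).2
           - (PySem.List.pyGetD traceroute (i-1) ("", 0)).2 > s.1
      then ((PySem.List.pyGetD traceroute i ("", 0)).2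
              - (PySem.List.pyGetD traceroute (i-1) ("", 0)).2, i - 1)
      else s)
    ((0 : Int), (0 : Int))).2

-- ===== PORT B =====
-- Literal port of Source B: jumps list comprehension, then the guard 'not jumps or max(jumps) <= 0',
-- else jumps.index(max(jumps)).  max(jumps) is PySem.List.max? (none ↔ empty list, matching 'not jumps');
-- jumps.index is index?, total here since the maximum is a member (getD 0 is never the default).
def find_bottleneck_index_alt (traceroute : List (String × Int)) : Int :=
  let jumps := (PySem.List.pyRange 1 (traceroute.length : Int) 1).map
    (fun i => (PySem.List.pyGetD traceroute i ("", 0)).2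
                - (PySem.List.pyGetD traceroute (i-1) ("", 0)).2)
  match PySem.List.max? jumps (fun y => y) with
  | none => 0
  | some m => if m ≤ 0 then 0 else ((PySem.List.index? jumps m).getD 0 : Int)

-- ===== PRECONDITION & SPEC =====
def Spec_find_bottleneck_index (traceroute : List (String × Int)) (out : Int) : Prop := out = find_bottleneck_index_alt traceroute
instance (traceroute : List (String × Int)) (out : Int) : Decidable (Spec_find_bottleneck_index traceroute out) := by unfold Spec_find_bottleneck_index; infer_instance

-- ===== CLAIM (what is proved, stated in full; the proofs are below) =====
def Claim_equal_find_bottleneck_index : Prop := ∀ (traceroute : List (String × Int)), Dom_find_bottleneck_index traceroute → Spec_find_bottleneck_index traceroute (find_bottleneck_index traceroute)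

-- ===== LEMMAS AND PROOFS =====

-- running max over a list commutes with an outer max on the seed
theorem pv_foldl_max_shift (l : List Int) : ∀ (a b : Int), l.foldl max (max a b) = max a (l.foldl max b) := by
  induction l with
  | nil => intro a b; rfl
  | cons h t ih =>
    intro a b
    simp only [List.foldl_cons]
    rw [max_assoc, ih]

-- the common reduction target: A's loop state expressed through the jumps list
def pvTarget (js : List Int) : Int :=
  if js.foldl max 0 ≤ 0 then 0 else ((PySem.List.index? js (js.foldl max 0)).getD 0 : Int)

-- core invariant of A's loop: folding over range(1, n+1) computes the running max of the jump
-- values seeded with 0, paired with the first index attaining it if it is positive, else 0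
theorem pv_core (f : Int → Int) : ∀ (n : Nat),
    ((PySem.List.pyRange 1 ((n : Int) + 1) 1).foldl
      (fun (s : Int × Int) i => if f i > s.1 then (f i, i - 1) else s)
      ((0 : Int), (0 : Int)))
    = (((PySem.List.pyRange 1 ((n : Int) + 1) 1).map f).foldl max 0,
       pvTarget ((PySem.List.pyRange 1 ((n : Int) + 1) 1).map f)) := by
  intro n
  induction n with
  | zero =>
    rw [PySem.List.pyRange_one_eq_nil (by norm_num)]
    simp [pvTarget]
  | succ n ih =>
    have hb : (((n + 1 : Nat)) : Int) + 1 = ((n : Int) + 1) + 1 := by push_cast; ring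
    rw [hb, PySem.List.pyRange_one_succ_right (by omega)]
    have hlen : ((PySem.List.pyRange 1 ((n : Int) + 1) 1).map f).length = n := by
      simp [PySem.List.length_pyRange_one]
    rw [List.foldl_append, List.map_append, List.foldl_append, ih]
    simp only [List.foldl_cons, List.foldl_nil, List.map_cons, List.map_nil]
    have harith : ((n : Int) + 1) - 1 = (n : Int) := by ring
    rw [harith]
    generalize hjs : (PySem.List.pyRange 1 ((n : Int) + 1) 1).map f = js at hlen ⊢
    generalize hx : f ((n : Int) + 1) = x
    have hM0 : (0 : Int) ≤ js.foldl max 0 := (PySem.List.le_foldl_max js 0).1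
    have happ : List.foldl max 0 (js ++ [x]) = max (js.foldl max 0) x := by
      rw [List.foldl_append]; simp
    by_cases hgt : x > js.foldl max 0
    · rw [if_pos hgt]
      have hMx : max (js.foldl max 0) x = x := max_eq_right hgt.le
      have hnot : x ∉ js := fun hmem =>
        absurd ((PySem.List.le_foldl_max js 0).2 x hmem) (not_le.mpr hgt)
      rw [hMx]
      refine Prod.ext rfl ?_
      simp only [pvTarget, happ, hMx]
      rw [if_neg (by omega : ¬ x ≤ 0),
        PySem.List.index?_append_singleton_self js x hnot]
      simp [hlen]
    · rw [if_neg hgt]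
      have hMx : max (js.foldl max 0) x = js.foldl max 0 := max_eq_left (not_lt.mp hgt)
      rw [hMx]
      refine Prod.ext rfl ?_
      simp only [pvTarget, happ, hMx]
      by_cases hM : js.foldl max 0 ≤ 0
      · rw [if_pos hM, if_pos hM]
      · have hmem : js.foldl max 0 ∈ js := by
          rcases PySem.List.foldl_max_mem js 0 with h | h
          · omega
          · exact h
        rw [if_neg hM, if_neg hM, PySem.List.index?_append_of_mem [x] hmem]

-- B's max?/index? formulation equals the common reduction target
theorem pv_alt_eq_target (traceroute : List (String × Int)) :
    find_bottleneck_index_alt traceroute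
    = pvTarget ((PySem.List.pyRange 1 (traceroute.length : Int) 1).map
        (fun i => (PySem.List.pyGetD traceroute i ("", 0)).2
                    - (PySem.List.pyGetD traceroute (i-1) ("", 0)).2)) := by
  simp only [find_bottleneck_index_alt]
  generalize (PySem.List.pyRange 1 (traceroute.length : Int) 1).map
      (fun i => (PySem.List.pyGetD traceroute i ("", 0)).2
                  - (PySem.List.pyGetD traceroute (i-1) ("", 0)).2) = js
  cases js with
  | nil => simp [PySem.List.max?, pvTarget]
  | cons h t =>
    rw [PySem.List.max?_id_cons]
    have hM : (h :: t).foldl max 0 = max 0 (t.foldl max h) := by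
      simp only [List.foldl_cons]
      rw [show (max (0 : Int) h) = max 0 h from rfl, pv_foldl_max_shift]
    simp only [pvTarget, hM]
    by_cases hm : t.foldl max h ≤ 0
    · rw [if_pos hm, if_pos (by omega : max (0 : Int) (t.foldl max h) ≤ 0)]
    · rw [if_neg hm, if_neg (by omega : ¬ max (0 : Int) (t.foldl max h) ≤ 0),
        max_eq_right (by omega : (0 : Int) ≤ t.foldl max h)]

-- ===== VERDICT (by name: the statement is the Claim_ definition above) =====
theorem find_bottleneck_index_spec : Claim_equal_find_bottleneck_index := by
  intro tr _
  unfold Spec_find_bottleneck_index find_bottleneck_index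
  rw [pv_alt_eq_target]
  cases hn : tr.length with
  | zero =>
    simp only [Nat.cast_zero]
    rw [PySem.List.pyRange_one_eq_nil (by omega)]
    simp [pvTarget]
  | succ n =>
    have hb : ((n + 1 : Nat) : Int) = (n : Int) + 1 := by push_cast; ring
    rw [hb, pv_core (fun i => (PySem.List.pyGetD tr i ("", 0)).2
            - (PySem.List.pyGetD tr (i-1) ("", 0)).2) n]
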